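-- pv_equiv track=rewrite | github.com/zzdd5201314-ctrl/FachuanHybridSystem | backend/apps/litigation_ai/services/flow/flow_state_machine.py | choose_primary_document_type
-- ===== SOURCE A (Python) =====
-- def choose_primary_document_type(recommended_types: list[str] | None) -> str | None | None:
--     if not recommended_types:
--         return None
--     priority = ["complaint", "defense", "counterclaim", "counterclaim_defense"]
--     for t in priority:
--         if t in recommended_types:
--             return t
--     return recommended_types[0]
-- ===== SOURCE B (Python) =====
-- def choose_primary_document_type(recommended_types):
--     if not recommended_types:
--         return None
--     rank = {t: i for i, t in enumerate(
--         ["complaint", "defense", "counterclaim", "counterclaim_defense"])}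
--     best = None  # (name, rank) with the lowest rank seen so far
--     for t in recommended_types:
--         k = rank.get(t)
--         if k is not None and (best is None or k < best[1]):
--             best = (t, k)
--     return best[0] if best is not None else recommended_types[0]
-- ===== Notes on version B (the rewrite author's own statement) =====
-- stated objective: alternative
-- what changed: B inverts the traversal: instead of scanning the fixed priority list and doing a membership scan of the input for each entry, it builds a name->rank dict once and makes a single pass over recommended_types tracking the element of minimum rank.
import Mathlib
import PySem

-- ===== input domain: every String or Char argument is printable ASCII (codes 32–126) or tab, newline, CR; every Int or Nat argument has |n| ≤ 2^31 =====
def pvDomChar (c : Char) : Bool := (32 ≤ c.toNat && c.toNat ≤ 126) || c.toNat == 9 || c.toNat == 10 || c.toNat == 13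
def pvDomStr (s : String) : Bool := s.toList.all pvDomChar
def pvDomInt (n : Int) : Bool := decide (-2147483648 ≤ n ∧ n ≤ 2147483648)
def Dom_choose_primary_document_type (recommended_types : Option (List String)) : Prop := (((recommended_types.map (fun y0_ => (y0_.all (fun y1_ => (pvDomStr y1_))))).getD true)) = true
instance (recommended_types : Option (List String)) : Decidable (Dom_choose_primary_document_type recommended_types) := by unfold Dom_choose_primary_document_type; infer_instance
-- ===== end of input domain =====

-- B replaces A's scan over the fixed priority list (with an inner membership scan of the
-- input for each entry) by a single pass over the input, tracking the element of minimum
-- rank via a name->rank dict; alternative decomposition, same return value.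

-- ===== PORT A =====
def choose_primary_document_type (recommended_types : Option (List String)) : Option String :=
  match recommended_types with
  | none => none            -- 'if not recommended_types: return None'
  | some [] => none
  | some l =>
    let priority : List String := ["complaint", "defense", "counterclaim", "counterclaim_defense"]
    -- 'for t in priority: if t in recommended_types: return t'
    match priority.find? (fun t => l.contains t) with
    | some t => some t
    | none => PySem.List.pyGet? l 0   -- 'return recommended_types[0]' (l nonempty, so in range)

-- ===== PORT B =====
def pvStep (acc : Option (String × Int)) (kOpt : Option Int) (t : String) : Option (String × Int) :=
  -- 'if k is not None and (best is None or k < best[1]): best = (t, k)'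
  match kOpt with
  | none => acc
  | some k =>
    match acc with
    | none => some (t, k)
    | some best => if k < best.2 then some (t, k) else acc

def choose_primary_document_type_alt (recommended_types : Option (List String)) : Option String :=
  match recommended_types with
  | none => none            -- 'if not recommended_types: return None'
  | some l =>
    if l.isEmpty then none else
    let rank : PySem.Dict String Int :=
      ((((PySem.Dict.empty.insert "complaint" 0).insert "defense" 1).insert
          "counterclaim" 2).insert "counterclaim_defense" 3)
    let best := l.foldl (fun acc t => pvStep acc (rank.get? t) t) none
    match best with
    | some b => some b.1
    | none => PySem.List.pyGet? l 0   -- 'recommended_types[0]'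

-- ===== PRECONDITION & SPEC =====
def Spec_choose_primary_document_type (recommended_types : Option (List String)) (out : Option String) : Prop := out = choose_primary_document_type_alt recommended_types
instance (recommended_types : Option (List String)) (out : Option String) : Decidable (Spec_choose_primary_document_type recommended_types out) := by unfold Spec_choose_primary_document_type; infer_instance

-- ===== CLAIM (what is proved, stated in full; the proofs are below) =====
def Claim_equal_choose_primary_document_type : Prop := ∀ (recommended_types : Option (List String)), Dom_choose_primary_document_type recommended_types → Spec_choose_primary_document_type recommended_types (choose_primary_document_type recommended_types)

-- ===== LEMMAS AND PROOFS =====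

-- the characterisation of B's running minimum: it equals this membership if-chain
def pvChain (l : List String) : Option (String × Int) :=
  if "complaint" ∈ l then some ("complaint", 0)
  else if "defense" ∈ l then some ("defense", 1)
  else if "counterclaim" ∈ l then some ("counterclaim", 2)
  else if "counterclaim_defense" ∈ l then some ("counterclaim_defense", 3)
  else none

def pvRank : PySem.Dict String Int :=
  ((((PySem.Dict.empty.insert "complaint" 0).insert "defense" 1).insert
      "counterclaim" 2).insert "counterclaim_defense" 3)

lemma pvRank_get (t : String) :
    pvRank.get? t =
      if t = "complaint" then some 0
      else if t = "defense" then some 1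
      else if t = "counterclaim" then some 2
      else if t = "counterclaim_defense" then some 3
      else none := by
  simp [pvRank, PySem.Dict.get?_insert, PySem.Dict.get?_empty]
  split_ifs <;> simp_all

lemma pvStep_chain (l : List String) (a : String) :
    pvStep (pvChain l) (pvRank.get? a) a = pvChain (l ++ [a]) := by
  rw [pvRank_get]
  by_cases h1 : a = "complaint" <;> by_cases h2 : a = "defense" <;>
    by_cases h3 : a = "counterclaim" <;> by_cases h4 : a = "counterclaim_defense" <;>
    simp_all [pvStep, pvChain, List.mem_append] <;> split_ifs <;> simp_all

lemma pvFold_chain (l : List String) :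
    l.foldl (fun acc t => pvStep acc (pvRank.get? t) t) none = pvChain l := by
  induction l using List.reverseRecOn with
  | nil => rfl
  | append_singleton l a ih => rw [List.foldl_append, List.foldl_cons, List.foldl_nil, ih, pvStep_chain]

-- ===== VERDICT (by name: the statement is the Claim_ definition above) =====
theorem choose_primary_document_type_spec : Claim_equal_choose_primary_document_type := by
  intro r _
  unfold Spec_choose_primary_document_type
  match r with
  | none => rfl
  | some [] => rfl
  | some (x :: xs) =>
    show _ = choose_primary_document_type_alt (some (x :: xs))
    unfold choose_primary_document_type choose_primary_document_type_alt
    dsimp only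
    rw [show ((((PySem.Dict.empty.insert "complaint" (0:Int)).insert "defense" 1).insert
          "counterclaim" 2).insert "counterclaim_defense" 3) = pvRank from rfl]
    rw [pvFold_chain]
    simp only [List.find?, pvChain]
    by_cases h1 : "complaint" ∈ x :: xs <;> by_cases h2 : "defense" ∈ x :: xs <;>
      by_cases h3 : "counterclaim" ∈ x :: xs <;>
      by_cases h4 : "counterclaim_defense" ∈ x :: xs <;>
      simp_all
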